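-- pv_equiv track=rewrite | github.com/redbleach5/Uroborous_Ultimate_AI | backend/agents/code_writer.py | validate_javascript_syntax
-- ===== SOURCE A (Python) =====
-- from typing import Dict, Any, Optional, Tuple
--
-- def validate_javascript_syntax(code: str) -> Tuple[bool, Optional[str]]:
--     """
--     Basic JavaScript syntax validation using heuristics.
--     For full validation, would need a JS parser.
--
--     Args:
--         code: JavaScript code string to validate
--
--     Returns:
--         Tuple of (is_valid, error_message)
--     """
--     if not code or not code.strip():
--         return True, None
--
--     # Basic bracket matching
--     brackets = {'(': ')', '{': '}', '[': ']'}
--     stack = []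
--     in_string = False
--     string_char = None
--     escape_next = False
--
--     for i, char in enumerate(code):
--         if escape_next:
--             escape_next = False
--             continue
--
--         if char == '\\':
--             escape_next = True
--             continue
--
--         if char in ('"', "'", '`'):
--             if not in_string:
--                 in_string = True
--                 string_char = char
--             elif char == string_char:
--                 in_string = False
--                 string_char = None
--             continue
--
--         if in_string:
--             continue
--
--         if char in brackets:
--             stack.append((char, i))
--         elif char in brackets.values():
--             if not stack:
--                 return False, f"Unmatched closing bracket '{char}' at position {i}"
--             open_bracket, _ = stack.pop()
--             if brackets[open_bracket] != char:
--                 return False, f"Mismatched brackets: expected '{brackets[open_bracket]}' but found '{char}' at position {i}"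
--
--     if stack:
--         open_bracket, pos = stack[-1]
--         return False, f"Unclosed bracket '{open_bracket}' at position {pos}"
--
--     return True, None
-- ===== SOURCE B (Python) =====
-- def validate_javascript_syntax(code):
--     if not code or not code.strip():
--         return True, None
--
--     brackets = {'(': ')', '{': '}', '[': ']'}
--     closers = {')', '}', ']'}
--
--     # Pass 1: scan the string once, tracking only escape/string state, and
--     # collect the bracket candidates (char, index) that are live code.
--     tokens = []
--     in_string = False
--     string_char = None
--     escape_next = False
--     for i, char in enumerate(code):
--         if escape_next:
--             escape_next = False
--         elif char == '\\':
--             escape_next = True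
--         elif char in ('"', "'", '`'):
--             if not in_string:
--                 in_string = True
--                 string_char = char
--             elif char == string_char:
--                 in_string = False
--                 string_char = None
--         elif in_string:
--             pass
--         elif char in brackets or char in closers:
--             tokens.append((char, i))
--
--     # Pass 2: pure stack matching over the collected tokens.
--     stack = []
--     for char, i in tokens:
--         if char in brackets:
--             stack.append((char, i))
--         else:
--             if not stack:
--                 return False, f"Unmatched closing bracket '{char}' at position {i}"
--             open_bracket, _ = stack.pop()
--             if brackets[open_bracket] != char:
--                 return False, f"Mismatched brackets: expected '{brackets[open_bracket]}' but found '{char}' at position {i}"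
--
--     if stack:
--         open_bracket, pos = stack[-1]
--         return False, f"Unclosed bracket '{open_bracket}' at position {pos}"
--     return True, None
-- ===== Notes on version B (the rewrite author's own statement) =====
-- stated objective: alternative
-- what changed: Split A's single fused loop into two passes: a tokenizer that tracks only escape/string state and emits (bracket, index) candidates, then a separate pure stack-matching pass over those tokens.
import Mathlib
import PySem

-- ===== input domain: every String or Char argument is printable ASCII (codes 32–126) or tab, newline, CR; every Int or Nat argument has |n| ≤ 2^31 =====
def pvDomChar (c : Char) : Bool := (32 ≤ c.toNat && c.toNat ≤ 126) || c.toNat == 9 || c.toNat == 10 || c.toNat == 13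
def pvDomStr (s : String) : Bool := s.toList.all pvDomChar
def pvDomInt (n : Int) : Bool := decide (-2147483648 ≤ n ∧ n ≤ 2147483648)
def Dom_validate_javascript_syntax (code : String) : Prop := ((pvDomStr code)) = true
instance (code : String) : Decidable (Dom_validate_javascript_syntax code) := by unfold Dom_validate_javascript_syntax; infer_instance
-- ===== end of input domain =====

-- B splits A's fused validation loop into a tokenizing pass (escape/string state only)
-- followed by a separate stack-matching pass over the collected bracket tokens; same results.


-- ===== PORT A =====
-- shared message / bracket-table helpers (identical text in both Pythons)
def isOpenBr (c : Char) : Bool := c = '(' || c = '{' || c = '['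
def isCloseBr (c : Char) : Bool := c = ')' || c = '}' || c = ']'
-- brackets[open_bracket]
def closeBr (c : Char) : Char := if c = '(' then ')' else if c = '{' then '}' else ']'
def msgUnmatched (c : Char) (i : Nat) : String :=
  "Unmatched closing bracket '" ++ String.singleton c ++ "' at position " ++ PySem.Int.toStr (i : Int)
def msgMismatch (e c : Char) (i : Nat) : String :=
  "Mismatched brackets: expected '" ++ String.singleton e ++ "' but found '" ++ String.singleton c
    ++ "' at position " ++ PySem.Int.toStr (i : Int)
def msgUnclosed (c : Char) (p : Nat) : String :=
  "Unclosed bracket '" ++ String.singleton c ++ "' at position " ++ PySem.Int.toStr (p : Int)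

-- A's single loop: escape/string state and the matching stack fused together.
def loopA : List Char → Nat → Bool → Bool → Option Char → List (Char × Nat) → Bool × Option String
  | [], _, _, _, _, stack =>
      match stack with
      | (c, p) :: _ => (false, some (msgUnclosed c p))
      | [] => (true, none)
  | c :: cs, i, esc, ins, sc, stack =>
      if esc then loopA cs (i+1) false ins sc stack
      else if c = '\\' then loopA cs (i+1) true ins sc stack
      else if c = '"' || c = '\'' || c = '`' then
        if !ins then loopA cs (i+1) esc true (some c) stack
        else if some c = sc then loopA cs (i+1) esc false none stack
        else loopA cs (i+1) esc ins sc stack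
      else if ins then loopA cs (i+1) esc ins sc stack
      else if isOpenBr c then loopA cs (i+1) esc ins sc ((c, i) :: stack)
      else if isCloseBr c then
        match stack with
        | [] => (false, some (msgUnmatched c i))
        | (o, _) :: rest =>
            if closeBr o ≠ c then (false, some (msgMismatch (closeBr o) c i))
            else loopA cs (i+1) esc ins sc rest
      else loopA cs (i+1) esc ins sc stack

def validate_javascript_syntax (code : String) : Bool × Option String :=
  if code = "" || PySem.Str.strip code = "" then (true, none)
  else loopA code.toList 0 false false none []

-- ===== PORT B =====
-- Pass 1: tokenizer carrying only escape/string state; emits (bracket, index) candidates.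
def tokensB : List Char → Nat → Bool → Bool → Option Char → List (Char × Nat)
  | [], _, _, _, _ => []
  | c :: cs, i, esc, ins, sc =>
      if esc then tokensB cs (i+1) false ins sc
      else if c = '\\' then tokensB cs (i+1) true ins sc
      else if c = '"' || c = '\'' || c = '`' then
        if !ins then tokensB cs (i+1) esc true (some c)
        else if some c = sc then tokensB cs (i+1) esc false none
        else tokensB cs (i+1) esc ins sc
      else if ins then tokensB cs (i+1) esc ins sc
      else if isOpenBr c || isCloseBr c then (c, i) :: tokensB cs (i+1) esc ins sc
      else tokensB cs (i+1) esc ins sc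

-- Pass 2: pure stack matching over the token list.
def matchB : List (Char × Nat) → List (Char × Nat) → Bool × Option String
  | [], stack =>
      match stack with
      | (c, p) :: _ => (false, some (msgUnclosed c p))
      | [] => (true, none)
  | (c, i) :: ts, stack =>
      if isOpenBr c then matchB ts ((c, i) :: stack)
      else match stack with
        | [] => (false, some (msgUnmatched c i))
        | (o, _) :: rest =>
            if closeBr o ≠ c then (false, some (msgMismatch (closeBr o) c i))
            else matchB ts rest

def validate_javascript_syntax_alt (code : String) : Bool × Option String :=
  if code = "" || PySem.Str.strip code = "" then (true, none)
  else matchB (tokensB code.toList 0 false false none) []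

-- ===== PRECONDITION & SPEC =====
def Spec_validate_javascript_syntax (code : String) (out : Bool × Option String) : Prop := out = validate_javascript_syntax_alt code
instance (code : String) (out : Bool × Option String) : Decidable (Spec_validate_javascript_syntax code out) := by unfold Spec_validate_javascript_syntax; infer_instance

-- ===== CLAIM (what is proved, stated in full; the proofs are below) =====
def Claim_equal_validate_javascript_syntax : Prop := ∀ (code : String), Dom_validate_javascript_syntax code → Spec_validate_javascript_syntax code (validate_javascript_syntax code)

-- ===== LEMMAS AND PROOFS =====
-- Fusion: running the matcher over the tokenizer's output equals A's fused loop.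
theorem loopA_eq_matchB (cs : List Char) :
    ∀ (i : Nat) (esc ins : Bool) (sc : Option Char) (stack : List (Char × Nat)),
      loopA cs i esc ins sc stack = matchB (tokensB cs i esc ins sc) stack := by
  induction cs with
  | nil => intro i esc ins sc stack; cases stack <;> rfl
  | cons c cs ih =>
    intro i esc ins sc stack
    simp only [loopA, tokensB]
    by_cases h1 : esc
    · simp [h1, ih]
    · by_cases h2 : c = '\\'
      · simp [h1, h2, ih]
      · by_cases h3 : (c = '"' || c = '\'' || c = '`') = true
        · by_cases h4 : ins
          · by_cases h5 : some c = sc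
            · simp [h1, h2, h3, h4, h5, ih]
            · simp [h1, h2, h3, h4, h5, ih]
          · simp [h1, h2, h3, h4, ih]
        · by_cases h4 : ins
          · simp [h1, h2, h3, h4, ih]
          · by_cases h5 : isOpenBr c
            · simp [h1, h2, h3, h4, h5, matchB, ih]
            · by_cases h6 : isCloseBr c
              · simp only [h1, h2, h3, h4, h5, h6, Bool.false_eq_true, if_neg,
                  if_pos, reduceIte, Bool.or_true, not_false_eq_true, matchB]
                cases stack with
                | nil => simp [matchB]
                | cons top rest =>
                    obtain ⟨o, p⟩ := top
                    by_cases hm : closeBr o = c <;> simp [matchB, hm, ih]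
              · simp [h1, h2, h3, h4, h5, h6, ih]

-- ===== VERDICT (by name: the statement is the Claim_ definition above) =====
theorem validate_javascript_syntax_spec : Claim_equal_validate_javascript_syntax := by
  intro code _
  unfold Spec_validate_javascript_syntax validate_javascript_syntax validate_javascript_syntax_alt
  split_ifs with h
  · rfl
  · exact loopA_eq_matchB code.toList 0 false false none []
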